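-- pv_equiv track=rewrite | github.com/shagunbandi/PersonalInvites | workAllotment/main.py | filter_columns
-- ===== SOURCE A (Python) =====
-- def is_empty_row(row):
--     """Check if a row is essentially empty (all fields empty or whitespace)"""
--     return all(cell.strip() == "" for cell in row)
--
-- def get_non_empty_columns(header, rows):
--     """Identify which columns have at least one non-empty value"""
--     num_cols = len(header)
--     has_content = [False] * num_cols
--
--     for row in rows:
--         if is_empty_row(row):
--             continue
--         for i in range(min(len(row), num_cols)):
--             if row[i].strip():
--                 has_content[i] = True
--
--     # Always keep the first few critical columns and header
--     return has_content
--
-- def filter_columns(header, rows):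
--     """Filter out completely empty columns but always keep headers"""
--     has_content = get_non_empty_columns(header, rows)
--
--     # Skip specific columns: 1st (index 0), 6th (index 5), 10th (index 9)
--     columns_to_skip = {0, 5, 9}
--
--     # Keep columns that have content and are not in the skip list
--     filtered_header = [
--         header[i]
--         for i in range(len(header))
--         if has_content[i] and i not in columns_to_skip
--     ]
--     filtered_rows = []
--
--     for row in rows:
--         if is_empty_row(row):
--             # Skip all empty rows
--             continue
--         else:
--             filtered_row = []
--             for i in range(len(header)):
--                 if has_content[i] and i not in columns_to_skip:
--                     if i < len(row):
--                         filtered_row.append(row[i])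
--                     else:
--                         filtered_row.append("")
--             filtered_rows.append(filtered_row)
--
--     return filtered_header, filtered_rows
-- ===== SOURCE B (Python) =====
-- def filter_columns(header, rows):
--     """Filter out completely empty columns but always keep headers"""
--     data = [row for row in rows if any(cell.strip() for cell in row)]
--     keep = [
--         i for i in range(len(header))
--         if i not in (0, 5, 9)
--         and any(i < len(row) and row[i].strip() for row in data)
--     ]
--     filtered_header = [header[i] for i in keep]
--     filtered_rows = [[row[i] if i < len(row) else "" for i in keep] for row in data]
--     return filtered_header, filtered_rows
-- ===== Notes on version B (the rewrite author's own statement) =====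
-- stated objective: simpler
-- what changed: B precomputes the kept-column index list once (skip-set filter plus a column-major any-scan over the non-empty rows) and shapes header and rows by mapping over that index list, instead of A's row-major has_content boolean table and per-cell re-evaluation of the content/skip predicate in every output loop.
import Mathlib
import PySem

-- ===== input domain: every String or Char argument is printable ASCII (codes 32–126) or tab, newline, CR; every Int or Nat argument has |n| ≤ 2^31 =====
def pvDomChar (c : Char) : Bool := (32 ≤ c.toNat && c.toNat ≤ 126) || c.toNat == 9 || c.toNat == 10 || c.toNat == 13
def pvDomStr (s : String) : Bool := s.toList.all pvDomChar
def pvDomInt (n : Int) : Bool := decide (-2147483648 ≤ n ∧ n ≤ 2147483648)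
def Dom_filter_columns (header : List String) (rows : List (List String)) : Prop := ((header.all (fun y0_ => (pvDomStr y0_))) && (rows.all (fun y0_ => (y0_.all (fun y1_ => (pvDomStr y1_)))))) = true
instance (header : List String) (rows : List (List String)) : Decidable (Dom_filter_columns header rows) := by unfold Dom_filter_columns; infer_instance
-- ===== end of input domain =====

-- B replaces A's per-cell re-evaluation of the content/skip predicate by one precomputed kept-index
-- list and a column-major content scan over the non-empty rows (objective: simpler).

-- ===== PORT A =====
def is_empty_row (row : List String) : Bool :=
  row.all (fun cell => PySem.Str.strip cell == "")

-- range(min(len(row), num_cols)) is a nonnegative range, so List.range is exact;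
-- every index read (row[i], header[i], has_content[i]) is in range, so getD is exact.
def get_non_empty_columns (header : List String) (rows : List (List String)) : List Bool :=
  let numCols := header.length
  rows.foldl
    (fun hc row =>
      if is_empty_row row then hc
      else
        (List.range (min row.length numCols)).foldl
          (fun hc i => if !(PySem.Str.strip (row.getD i "") == "") then hc.set i true else hc)
          hc)
    (List.replicate numCols false)

def filter_columns (header : List String) (rows : List (List String)) : List String × List (List String) :=
  let has_content := get_non_empty_columns header rows
  let columns_to_skip : List Nat := [0, 5, 9]
  let filtered_header :=
    (List.range header.length).foldl
      (fun acc i =>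
        if has_content.getD i false && !(columns_to_skip.contains i) then acc ++ [header.getD i ""]
        else acc)
      []
  let filtered_rows :=
    rows.foldl
      (fun acc row =>
        if is_empty_row row then acc
        else
          acc ++ [(List.range header.length).foldl
            (fun fr i =>
              if has_content.getD i false && !(columns_to_skip.contains i) then
                if i < row.length then fr ++ [row.getD i ""] else fr ++ [""]
              else fr)
            []])
      []
  (filtered_header, filtered_rows)

-- ===== PORT B =====
def filter_columns_alt (header : List String) (rows : List (List String)) : List String × List (List String) :=
  let data := rows.filter (fun row => row.any (fun cell => !(PySem.Str.strip cell == "")))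
  let keep :=
    (List.range header.length).filter
      (fun i =>
        !(i == 0 || i == 5 || i == 9) &&
        data.any (fun row => decide (i < row.length) && !(PySem.Str.strip (row.getD i "") == "")))
  let filtered_header := keep.map (fun i => header.getD i "")
  let filtered_rows := data.map (fun row => keep.map (fun i => if i < row.length then row.getD i "" else ""))
  (filtered_header, filtered_rows)

-- ===== PRECONDITION & SPEC =====
def Spec_filter_columns (header : List String) (rows : List (List String)) (out : List String × List (List String)) : Prop := out = filter_columns_alt header rows
instance (header : List String) (rows : List (List String)) (out : List String × List (List String)) : Decidable (Spec_filter_columns header rows out) := by unfold Spec_filter_columns; infer_instance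

-- ===== CLAIM (what is proved, stated in full; the proofs are below) =====
def Claim_equal_filter_columns : Prop := ∀ (header : List String) (rows : List (List String)), Dom_filter_columns header rows → Spec_filter_columns header rows (filter_columns header rows)

-- ===== LEMMAS AND PROOFS =====

theorem not_empty_iff_any (row : List String) :
    (!is_empty_row row) = row.any (fun cell => !(PySem.Str.strip cell == "")) := by
  simp [is_empty_row, List.all_eq_not_any_not]

-- the inner set-loop preserves length
theorem setloop_length (q : Nat → Bool) (m : Nat) (hc : List Bool) :
    ((List.range m).foldl (fun hc i => if q i then hc.set i true else hc) hc).length = hc.length := by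
  induction m generalizing hc with
  | zero => rfl
  | succ m ih =>
      rw [List.range_succ, List.foldl_append]
      simp only [List.foldl_cons, List.foldl_nil]
      split <;> simp [ih]

-- the inner set-loop, read back pointwise
theorem setloop_getD (q : Nat → Bool) (m : Nat) (hc : List Bool) (hm : m ≤ hc.length) (i : Nat) :
    ((List.range m).foldl (fun hc i => if q i then hc.set i true else hc) hc).getD i false
      = (hc.getD i false || (decide (i < m) && q i)) := by
  induction m generalizing hc with
  | zero => simp
  | succ m ih =>
      rw [List.range_succ, List.foldl_append]
      simp only [List.foldl_cons, List.foldl_nil]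
      have hlen : ((List.range m).foldl (fun hc i => if q i then hc.set i true else hc) hc).length = hc.length :=
        setloop_length q m hc
      by_cases hq : q m
      · simp only [hq, if_pos]
        rcases Nat.lt_trichotomy i m with h | h | h
        · rw [List.getD_eq_getElem?_getD, List.getElem?_set_ne (by omega)]
          rw [← List.getD_eq_getElem?_getD, ih hc (by omega)]
          simp [Nat.lt_succ_of_lt h, h]
        · subst h
          rw [List.getD_eq_getElem?_getD, List.getElem?_set_self (by omega), Option.getD_some]
          simp [hq]
        · rw [List.getD_eq_getElem?_getD, List.getElem?_set_ne (by omega)]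
          rw [← List.getD_eq_getElem?_getD, ih hc (by omega)]
          have h1 : ¬ i < m := by omega
          have h2 : ¬ i < m + 1 := by omega
          simp [h1, h2]
      · simp only [hq, if_neg, Bool.not_eq_true]
        rw [ih hc (by omega)]
        rcases Nat.lt_trichotomy i m with h | h | h
        · simp [h, Nat.lt_succ_of_lt h]
        · subst h; simp [hq]
        · have h1 : ¬ i < m := by omega
          have h2 : ¬ i < m + 1 := by omega
          simp [h1, h2]

def rowStep (n : Nat) : List Bool → List String → List Bool :=
  fun hc row =>
    if is_empty_row row then hc
    else
      (List.range (min row.length n)).foldl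
        (fun hc i => if !(PySem.Str.strip (row.getD i "") == "") then hc.set i true else hc)
        hc

theorem rowStep_length (n : Nat) (hc : List Bool) (row : List String) :
    (rowStep n hc row).length = hc.length := by
  unfold rowStep
  split
  · rfl
  · exact setloop_length _ _ hc

theorem foldl_rowStep_getD (n : Nat) (rows : List (List String)) (hc : List Bool)
    (hlen : hc.length = n) (i : Nat) :
    (rows.foldl (rowStep n) hc).getD i false
      = (hc.getD i false ||
          rows.any (fun row => !is_empty_row row && (decide (i < min row.length n) &&
            !(PySem.Str.strip (row.getD i "") == "")))) := by
  induction rows generalizing hc with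
  | nil => simp
  | cons r rs ih =>
      simp only [List.foldl_cons, List.any_cons]
      rw [ih (rowStep n hc r) (by rw [rowStep_length, hlen])]
      unfold rowStep
      by_cases he : is_empty_row r
      · simp [he]
      · simp only [he, if_neg, Bool.not_eq_true, Bool.not_false, Bool.true_and]
        rw [setloop_getD _ _ hc (by omega)]
        simp [Bool.or_assoc]

theorem has_content_getD (header : List String) (rows : List (List String)) (i : Nat) :
    (get_non_empty_columns header rows).getD i false
      = rows.any (fun row => !is_empty_row row && (decide (i < min row.length header.length) &&
          !(PySem.Str.strip (row.getD i "") == ""))) := by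
  rw [show get_non_empty_columns header rows
      = rows.foldl (rowStep header.length) (List.replicate header.length false) from rfl]
  rw [foldl_rowStep_getD header.length rows _ (by simp) i]
  simp

-- the two keep-predicates agree on indices below len(header)
theorem keep_pred_eq (header : List String) (rows : List (List String)) (i : Nat)
    (hi : i < header.length) :
    ((get_non_empty_columns header rows).getD i false && !([0, 5, 9].contains i))
      = (!(i == 0 || i == 5 || i == 9) &&
          (rows.filter (fun row => row.any (fun cell => !(PySem.Str.strip cell == "")))).any
            (fun row => decide (i < row.length) && !(PySem.Str.strip (row.getD i "") == ""))) := by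
  rw [has_content_getD]
  have hfil : (rows.filter (fun row => row.any (fun cell => !(PySem.Str.strip cell == "")))).any
      (fun row => decide (i < row.length) && !(PySem.Str.strip (row.getD i "") == ""))
      = rows.any (fun row => row.any (fun cell => !(PySem.Str.strip cell == "")) &&
          (decide (i < row.length) && !(PySem.Str.strip (row.getD i "") == ""))) := by
    simp [List.any_filter]
  rw [hfil]
  have hmin : ∀ row : List String,
      decide (i < min row.length header.length) = decide (i < row.length) := by
    intro row
    rcases Nat.lt_or_ge i row.length with h | h
    · simp [h, hi]
    · have : ¬ i < min row.length header.length := by omega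
      simp [this, Nat.not_lt.mpr h]
  have hbody : ∀ row : List String,
      (!is_empty_row row && (decide (i < min row.length header.length) &&
        !(PySem.Str.strip (row.getD i "") == "")))
      = (row.any (fun cell => !(PySem.Str.strip cell == "")) &&
          (decide (i < row.length) && !(PySem.Str.strip (row.getD i "") == ""))) := by
    intro row
    rw [not_empty_iff_any, hmin]
  have hany : rows.any (fun row =>
      !is_empty_row row && (decide (i < min row.length header.length) &&
        !(PySem.Str.strip (row.getD i "") == "")))
      = rows.any (fun row => row.any (fun cell => !(PySem.Str.strip cell == "")) &&
          (decide (i < row.length) && !(PySem.Str.strip (row.getD i "") == ""))) := by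
    congr 1
    funext row
    exact hbody row
  rw [hany, Bool.and_comm]
  congr 1
  congr 1
  simp only [List.contains_cons, List.contains_nil, Bool.or_false, Bool.or_assoc]

theorem filter_columns_eq (header : List String) (rows : List (List String)) :
    filter_columns header rows = filter_columns_alt header rows := by
  unfold filter_columns filter_columns_alt
  simp only []
  have hkeep : (List.range header.length).filter
        (fun i => (get_non_empty_columns header rows).getD i false && !([0, 5, 9].contains i))
      = (List.range header.length).filter
        (fun i => !(i == 0 || i == 5 || i == 9) &&
          (rows.filter (fun row => row.any (fun cell => !(PySem.Str.strip cell == "")))).any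
            (fun row => decide (i < row.length) && !(PySem.Str.strip (row.getD i "") == ""))) := by
    apply List.filter_congr
    intro i hi
    exact keep_pred_eq header rows i (List.mem_range.mp hi)
  congr 1
  · -- header component
    rw [PySem.List.foldl_append_if
        (p := fun i => (get_non_empty_columns header rows).getD i false && !([0, 5, 9].contains i))
        (f := fun i => header.getD i "")]
    rw [hkeep]; rfl
  · -- rows component
    have houter : rows.foldl
        (fun acc row =>
          if is_empty_row row then acc
          else acc ++ [(List.range header.length).foldl
            (fun fr i =>
              if (get_non_empty_columns header rows).getD i false && !([0, 5, 9].contains i) then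
                if i < row.length then fr ++ [row.getD i ""] else fr ++ [""]
              else fr) []]) []
        = rows.foldl
        (fun acc row =>
          if (fun row => !is_empty_row row) row then acc ++ [(fun row => (List.range header.length).foldl
            (fun fr i =>
              if (get_non_empty_columns header rows).getD i false && !([0, 5, 9].contains i) then
                if i < row.length then fr ++ [row.getD i ""] else fr ++ [""]
              else fr) []) row] else acc) [] := by
      apply PySem.List.foldl_congr_mem
      intro acc row _
      by_cases he : is_empty_row row <;> simp [he]
    rw [houter, PySem.List.foldl_append_if]
    have hfil2 : rows.filter (fun row => !is_empty_row row)
        = rows.filter (fun row => row.any (fun cell => !(PySem.Str.strip cell == ""))) := by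
      apply List.filter_congr
      intro row _
      exact not_empty_iff_any row
    rw [hfil2]
    simp only [List.nil_append]
    apply List.map_congr_left
    intro row _
    have hinner : (List.range header.length).foldl
        (fun fr i =>
          if (get_non_empty_columns header rows).getD i false && !([0, 5, 9].contains i) then
            if i < row.length then fr ++ [row.getD i ""] else fr ++ [""]
          else fr) []
        = (List.range header.length).foldl
        (fun fr i =>
          if (fun i => (get_non_empty_columns header rows).getD i false && !([0, 5, 9].contains i)) i
          then fr ++ [(fun i => if i < row.length then row.getD i "" else "") i] else fr) [] := by
      apply PySem.List.foldl_congr_mem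
      intro fr i _
      cases hcb : ((get_non_empty_columns header rows).getD i false && !([0, 5, 9].contains i))
      · simp only [hcb, Bool.false_eq_true, if_false]
      · simp only [hcb, if_true]
        split <;> simp
    rw [hinner, PySem.List.foldl_append_if, hkeep]
    rfl

-- ===== VERDICT (by name: the statement is the Claim_ definition above) =====
theorem filter_columns_spec : Claim_equal_filter_columns := by
  intro header rows _
  unfold Spec_filter_columns
  exact filter_columns_eq header rows
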